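-- pv_equiv track=rewrite | github.com/AKJama/analysing_ABFs | src/analysis_functions.py | file_ids
-- ===== SOURCE A (Python) =====
-- def file_ids(day, start, end):
--     """Returns the iv and cc file_id information.
--
--     Keyword arguments:
--     day -- day of recording
--     start -- initial iv file
--     end -- final iv file + 1
--     """
--
--     # Array of even and odd numbers between start and end (with a leading 0 below 10)
--     file_ids_even = [
--         str(x) if x > 9 else "0" + str(x) for x in range(start, end) if x % 2 == 0
--     ]
--     file_ids_odd = [
--         str(x) if x > 9 else "0" + str(x) for x in range(start, end) if x % 2 == 1
--     ]
--
--     # If start is even then iv_file_ids = file_ids_even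
--     iv_file_ids = file_ids_even if start % 2 == 0 else file_ids_odd
--     iv_files = [day + "_00{}".format(value) for value in iv_file_ids]
--
--     cc_file_ids = file_ids_odd if start % 2 == 0 else file_ids_even
--     cc_files = [day + "_00{}".format(value) for value in cc_file_ids]
--
--     return [iv_files, cc_files]
-- ===== SOURCE B (Python) =====
-- def file_ids(day, start, end):
--     """Single routed pass over range(start, end): build each padded name once
--     and append it to iv_files when x has start's parity, else to cc_files."""
--     iv_files = []
--     cc_files = []
--     r = start % 2
--     for x in range(start, end):
--         t = str(x) if x > 9 else "0" + str(x)
--         s = day + "_00" + t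
--         if x % 2 == r:
--             iv_files.append(s)
--         else:
--             cc_files.append(s)
--     return [iv_files, cc_files]
-- ===== Notes on version B (the rewrite author's own statement) =====
-- stated objective: simpler
-- what changed: Replaces the two filtered comprehensions plus parity-based list selection and two formatting passes with one routed pass over range(start, end) that builds each name once and appends it to iv_files or cc_files by comparing x % 2 with start % 2.
import Mathlib
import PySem

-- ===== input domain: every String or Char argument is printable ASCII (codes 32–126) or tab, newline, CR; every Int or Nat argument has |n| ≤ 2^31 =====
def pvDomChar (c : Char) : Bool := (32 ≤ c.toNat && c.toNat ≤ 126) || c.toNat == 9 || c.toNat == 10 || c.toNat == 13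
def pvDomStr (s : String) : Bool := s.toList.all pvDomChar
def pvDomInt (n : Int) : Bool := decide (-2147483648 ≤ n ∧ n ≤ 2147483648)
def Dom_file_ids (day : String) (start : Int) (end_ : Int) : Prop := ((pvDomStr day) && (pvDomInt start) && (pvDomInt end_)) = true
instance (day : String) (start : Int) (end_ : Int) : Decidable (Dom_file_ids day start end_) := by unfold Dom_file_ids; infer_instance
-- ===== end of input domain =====

-- B replaces A's two filtered comprehensions and parity-based selection with one
-- routed pass over the range (objective: simpler); return values proved equal on all inputs.


-- ===== PORT A =====
-- leading-zero padding: str(x) if x > 9 else "0" + str(x)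
def pvPad (x : Int) : String := if x > 9 then PySem.Int.toStr x else "0" ++ PySem.Int.toStr x

def file_ids (day : String) (start : Int) (end_ : Int) : List (List String) :=
  let file_ids_even := ((PySem.List.pyRange start end_ 1).filter
      (fun x => PySem.Int.mod x 2 == 0)).map pvPad
  let file_ids_odd := ((PySem.List.pyRange start end_ 1).filter
      (fun x => PySem.Int.mod x 2 == 1)).map pvPad
  let iv_file_ids := if PySem.Int.mod start 2 == 0 then file_ids_even else file_ids_odd
  let iv_files := iv_file_ids.map (fun value => day ++ "_00" ++ value)
  let cc_file_ids := if PySem.Int.mod start 2 == 0 then file_ids_odd else file_ids_even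
  let cc_files := cc_file_ids.map (fun value => day ++ "_00" ++ value)
  [iv_files, cc_files]

-- ===== PORT B =====
def file_ids_alt (day : String) (start : Int) (end_ : Int) : List (List String) :=
  let r := PySem.Int.mod start 2
  let p := (PySem.List.pyRange start end_ 1).foldl
    (fun (acc : List String × List String) x =>
      let t := if x > 9 then PySem.Int.toStr x else "0" ++ PySem.Int.toStr x
      let s := day ++ "_00" ++ t
      if PySem.Int.mod x 2 == r then (acc.1 ++ [s], acc.2) else (acc.1, acc.2 ++ [s]))
    ([], [])
  [p.1, p.2]

-- ===== PRECONDITION & SPEC =====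
def Spec_file_ids (day : String) (start : Int) (end_ : Int) (out : List (List String)) : Prop := out = file_ids_alt day start end_
instance (day : String) (start : Int) (end_ : Int) (out : List (List String)) : Decidable (Spec_file_ids day start end_ out) := by unfold Spec_file_ids; infer_instance

-- ===== CLAIM (what is proved, stated in full; the proofs are below) =====
def Claim_equal_file_ids : Prop := ∀ (day : String) (start : Int) (end_ : Int), Dom_file_ids day start end_ → Spec_file_ids day start end_ (file_ids day start end_)


-- ===== LEMMAS AND PROOFS =====

-- the routed fold of B produces (iv ++ matching names, cc ++ the rest)
theorem pv_route_foldl (day : String) (r : Int) (l : List Int) (iv cc : List String) :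
    l.foldl (fun (acc : List String × List String) x =>
        let t := if x > 9 then PySem.Int.toStr x else "0" ++ PySem.Int.toStr x
        let s := day ++ "_00" ++ t
        if PySem.Int.mod x 2 == r then (acc.1 ++ [s], acc.2) else (acc.1, acc.2 ++ [s]))
      (iv, cc)
    = (iv ++ (l.filter (fun x => PySem.Int.mod x 2 == r)).map (fun x => day ++ "_00" ++ pvPad x),
       cc ++ (l.filter (fun x => !(PySem.Int.mod x 2 == r))).map (fun x => day ++ "_00" ++ pvPad x)) := by
  induction l generalizing iv cc with
  | nil => simp
  | cons a t ih =>
    rw [List.foldl_cons]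
    by_cases h : PySem.Int.mod a 2 = r
    · have hb : (PySem.Int.mod a 2 == r) = true := by rw [beq_iff_eq]; exact h
      simp only [hb, if_true, Bool.not_true, ih, List.filter_cons, Bool.false_eq_true,
        if_false, List.map_cons, List.append_assoc, List.singleton_append, pvPad]
    · have hb : (PySem.Int.mod a 2 == r) = false := by rw [beq_eq_false_iff_ne]; exact h
      simp only [hb, Bool.false_eq_true, if_false, Bool.not_false, if_true, ih,
        List.filter_cons, List.map_cons, List.append_assoc, List.singleton_append, pvPad]

theorem pv_mod_two (x : Int) : PySem.Int.mod x 2 = 0 ∨ PySem.Int.mod x 2 = 1 := by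
  have h0 := PySem.Int.mod_nonneg x (b := 2) (by norm_num)
  have h1 := PySem.Int.mod_lt x (b := 2) (by norm_num)
  omega

theorem pv_filter_not_zero (l : List Int) :
    l.filter (fun x => !(PySem.Int.mod x 2 == 0)) = l.filter (fun x => PySem.Int.mod x 2 == 1) := by
  apply List.filter_congr
  intro x _
  rcases pv_mod_two x with hx | hx <;> rw [hx] <;> decide

theorem pv_filter_not_one (l : List Int) :
    l.filter (fun x => !(PySem.Int.mod x 2 == 1)) = l.filter (fun x => PySem.Int.mod x 2 == 0) := by
  apply List.filter_congr
  intro x _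
  rcases pv_mod_two x with hx | hx <;> rw [hx] <;> decide

-- ===== VERDICT =====
theorem file_ids_spec : Claim_equal_file_ids := by
  intro day start end_ _
  show file_ids day start end_ = file_ids_alt day start end_
  simp only [file_ids, file_ids_alt]
  rw [pv_route_foldl]
  rcases pv_mod_two start with h | h <;> rw [h]
  · simp only [show ((0 : Int) == 0) = true from rfl, if_true, List.nil_append,
      List.map_map, pv_filter_not_zero]
    rfl
  · simp only [show ((1 : Int) == 0) = false from rfl, Bool.false_eq_true, if_false,
      List.nil_append, List.map_map, pv_filter_not_one]
    rfl
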